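-- pv_equiv track=rewrite | github.com/Casey-jS/Graph-Theory-Colorings-Final | 325Final.py | three_color
-- ===== SOURCE A (Python) =====
-- import copy
--
-- def three_color(graph):
--
--     num_vertices = len(graph)
--     coloring = []
--
--     # recursively returns list of all color permutations
--     def list_perms(length, colors=[]):
--         if length == 0: return colors
--         else:
--             length -= 1
--             return list_perms(length, [1] + colors) + list_perms(length, [2] + colors) + list_perms(length, [3] + colors)
--
--     # list of all vertices
--     vertices = []
--     for v in graph: vertices.append(v)
--
--     # list of all color permutations
--     colors = list_perms(num_vertices)
--
--     # separates list into list of lists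
--     def get_sublists(lst):
--         for i in range(0, len(lst), num_vertices):
--             yield lst[i:i + num_vertices]
--
--     colors = get_sublists(colors)
--
--     for lst in colors:
--         d = {}
--         # assign a color to each vertex
--         i = 0
--         for color in lst:
--             d[vertices[i]] = color
--             i += 1
--
--         dcopy = copy.deepcopy(d)
--         coloring.append(dcopy)
--
--     return coloring
-- ===== SOURCE B (Python) =====
-- def three_color(graph):
--     colorings = [{}]
--     for v in graph:
--         colorings = [{**c, v: color} for color in (1, 2, 3) for c in colorings]
--     return colorings
-- ===== Notes on version B (the rewrite author's own statement) =====
-- stated objective: simpler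
-- what changed: Replaced A's recursive flat color-permutation list + chunking generator + indexed deepcopy loop by a single fold that extends every partial coloring with each of the 3 colors per vertex.
-- outside the precondition, e.g. on three_color({}): A raises ValueError, B returns [{}]
-- crash fix: On the empty graph A raises ValueError (range() arg 3 must not be zero); B returns [{}], the single empty coloring. — e.g. on three_color([]): A raises ValueError, B returns [[]]
import Mathlib
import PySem

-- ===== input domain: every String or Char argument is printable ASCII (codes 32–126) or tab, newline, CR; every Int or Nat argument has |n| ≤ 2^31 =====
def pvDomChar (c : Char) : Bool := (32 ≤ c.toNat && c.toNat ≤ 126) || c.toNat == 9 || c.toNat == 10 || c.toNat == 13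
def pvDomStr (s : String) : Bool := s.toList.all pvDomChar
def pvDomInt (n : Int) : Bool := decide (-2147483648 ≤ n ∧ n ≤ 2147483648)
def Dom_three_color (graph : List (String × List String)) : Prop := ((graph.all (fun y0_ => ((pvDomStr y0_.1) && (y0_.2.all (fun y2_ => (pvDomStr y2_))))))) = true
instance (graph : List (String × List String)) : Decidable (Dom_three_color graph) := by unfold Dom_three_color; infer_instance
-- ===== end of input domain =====

-- B replaces A's recursive flat color-permutation list + chunking generator + indexed deepcopy loop
-- by one fold that triples the list of partial colorings per vertex (simpler; same return value).

-- ===== PORT A =====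
-- helper: A's inner 'list_perms' (recursion on the remaining length, accumulator 'colors')
def pvListPerms : Nat → List Int → List Int
  | 0, colors => colors
  | l + 1, colors =>
      pvListPerms l (1 :: colors) ++ pvListPerms l (2 :: colors) ++ pvListPerms l (3 :: colors)

def three_color (graph : List (String × List String)) : List (List (String × Int)) :=
  -- iterating the Python dict yields its (distinct) keys in insertion order
  let vertices : List String := PySem.List.dedup (graph.map Prod.fst)
  let num_vertices : Nat := vertices.length
  let flat : List Int := pvListPerms num_vertices []
  -- get_sublists: for i in range(0, len(lst), num_vertices): yield lst[i:i+num_vertices]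
  let colors : List (List Int) :=
    (PySem.List.pyRange 0 (PySem.List.len flat) (num_vertices : Int)).map
      (fun i => PySem.List.slice flat (some i) (some (i + (num_vertices : Int))))
  colors.foldl (fun coloring lst =>
    let d : PySem.Dict String Int :=
      (lst.foldl (fun (st : PySem.Dict String Int × Int) color =>
          (st.1.insert (PySem.List.pyGetD vertices st.2 "") color, st.2 + 1))
        (PySem.Dict.empty, (0 : Int))).1
    -- dcopy = copy.deepcopy(d): a fresh value; identity for the return value
    coloring ++ [d.items]) []

-- ===== PORT B =====
def three_color_alt (graph : List (String × List String)) : List (List (String × Int)) :=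
  ((PySem.List.dedup (graph.map Prod.fst)).foldl
    (fun colorings v =>
      ([1, 2, 3] : List Int).flatMap (fun color =>
        colorings.map (fun c => c.insert v color)))
    [(PySem.Dict.empty : PySem.Dict String Int)]).map PySem.Dict.items

-- ===== PRECONDITION & SPEC =====
-- Pre_ excludes only the empty graph, on which A raises ValueError (range() step 0).
def Pre_three_color (graph : List (String × List String)) : Prop := graph ≠ []
instance (graph : List (String × List String)) : Decidable (Pre_three_color graph) := by
  unfold Pre_three_color; infer_instance

def pvWitness_three_color : (List (String × List String)) := [("a", ["b"]), ("b", ["a"])]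

-- On the empty graph A raises ValueError (range() arg 3 must not be zero); B returns [{}], the one empty coloring.
def Raises_three_color (graph : List (String × List String)) : Prop := graph = []
instance (graph : List (String × List String)) : Decidable (Raises_three_color graph) := by
  unfold Raises_three_color; infer_instance
def pvRaiseWitness_three_color : (List (String × List String)) := []
def pvRaiseWitnessOut_three_color : List (List (String × Int)) := [[]]

def Spec_three_color (graph : List (String × List String)) (out : List (List (String × Int))) : Prop := out = three_color_alt graph
instance (graph : List (String × List String)) (out : List (List (String × Int))) : Decidable (Spec_three_color graph out) := by unfold Spec_three_color; infer_instance

-- ===== CLAIM (what is proved, stated in full; the proofs are below) =====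
def Claim_equal_three_color : Prop := ∀ (graph : List (String × List String)), Dom_three_color graph → Pre_three_color graph → Spec_three_color graph (three_color graph)

def Claim_raises_three_color : Prop := (∀ (graph : List (String × List String)), Dom_three_color graph → Raises_three_color graph → ¬ Pre_three_color graph) ∧ (Dom_three_color (pvRaiseWitness_three_color) ∧ Raises_three_color (pvRaiseWitness_three_color) ∧ three_color_alt (pvRaiseWitness_three_color) = pvRaiseWitnessOut_three_color)

-- ===== LEMMAS AND PROOFS =====

-- the 3^n color tuples in the order both programs produce them: the FIRST coordinate varies fastest
def pvTuples : Nat → List (List Int)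
  | 0 => [[]]
  | n + 1 => ([1, 2, 3] : List Int).flatMap (fun c => (pvTuples n).map (· ++ [c]))

theorem pvListPerms_eq (n : Nat) (acc : List Int) :
    pvListPerms n acc = (pvTuples n).flatMap (fun t => t ++ acc) := by
  induction n generalizing acc with
  | zero => simp [pvListPerms, pvTuples]
  | succ n ih =>
      simp [pvListPerms, pvTuples, ih, List.flatMap_map, List.append_assoc]

theorem pvTuples_len (n : Nat) : ∀ t ∈ pvTuples n, t.length = n := by
  induction n with
  | zero => simp [pvTuples]
  | succ n ih =>
      intro t ht
      simp only [pvTuples, List.mem_flatMap, List.mem_map] at ht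
      obtain ⟨c, -, t', ht', rfl⟩ := ht
      simp [ih t' ht']

theorem pv_drop_flat (n : Nat) :
    ∀ (ls : List (List Int)) (k : Nat), (∀ t ∈ ls, t.length = n) →
      (ls.flatMap id).drop (k * n) = (ls.drop k).flatMap id := by
  intro ls
  induction ls with
  | nil => simp
  | cons t rest ih =>
      intro k h
      cases k with
      | zero => simp
      | succ j =>
          have ht : t.length = n := h t (by simp)
          have h2 : (j + 1) * n = t.length + j * n := by rw [ht]; ring
          rw [h2, List.flatMap_cons]
          simp only [id_eq]
          rw [List.drop_length_add_append _,
            List.drop_succ_cons, ih j (fun u hu => h u (by simp [hu]))]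

theorem pv_chunks (n : Nat) (hn : 0 < n) (ls : List (List Int)) (h : ∀ t ∈ ls, t.length = n) :
    (PySem.List.pyRange 0 (PySem.List.len (ls.flatMap id)) (n : Int)).map
      (fun i => PySem.List.slice (ls.flatMap id) (some i) (some (i + (n : Int)))) = ls := by
  have hlen : (ls.flatMap id).length = ls.length * n := by
    rw [List.length_flatMap]
    rw [show (List.map (fun x => (id x).length) ls) = List.map (fun _ => n) ls from
      List.map_congr_left (fun t ht => by simp [h t ht])]
    simp [mul_comm]
  rw [PySem.List.len_eq, hlen, PySem.List.pyRange_of_pos _ _ (by exact_mod_cast hn)]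
  by_cases hL : ls = []
  · simp [hL]
  have hLpos : 0 < ls.length := List.length_pos_iff.mpr hL
  have hcount : (if (0:Int) < ((ls.length * n : Nat) : Int)
      then ((((ls.length * n : Nat) : Int) - 0 + (n:Int) - 1) / (n:Int)).toNat else 0) = ls.length := by
    rw [if_pos (by positivity)]
    have e1 : (((ls.length * n : Nat) : Int) - 0 + (n:Int) - 1) = ((ls.length * n + n - 1 : Nat) : Int) := by
      push_cast [hn]; omega
    rw [e1]
    have e2 : ((ls.length * n + n - 1 : Nat) : Int) / (n : Int) = ((ls.length * n + n - 1) / n : Nat) := by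
      rw [Int.ofNat_ediv_ofNat]
    rw [e2, Int.toNat_natCast]
    have e3 : ls.length * n + n - 1 = (n - 1) + ls.length * n := by omega
    rw [e3, Nat.add_mul_div_right _ _ hn, Nat.div_eq_of_lt (by omega)]
    omega
  rw [hcount, List.map_map]
  apply List.ext_getElem (by simp)
  intro k hk1 hk2
  simp only [List.getElem_map, List.getElem_range, Function.comp]
  have e4 : (0 : Int) + (n : Int) * (k : Int) = ((k * n : Nat) : Int) := by push_cast; ring
  rw [e4, PySem.List.slice_natCast_add, pv_drop_flat n ls k h,
    List.drop_eq_getElem_cons (by simpa using hk1), List.flatMap_cons]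
  have h5 : (id ls[k]).length = n := by simpa using h ls[k] (List.getElem_mem _)
  rw [List.take_left' h5]
  simp

-- A's indexed dict-building loop is a fold of inserts over vs.zip t
theorem pv_zipfold (vs : List String) :
    ∀ (t : List Int) (k : Nat) (d : PySem.Dict String Int), k + t.length ≤ vs.length →
      (t.foldl (fun (st : PySem.Dict String Int × Int) color =>
          (st.1.insert (PySem.List.pyGetD vs st.2 "") color, st.2 + 1)) (d, (k : Int))).1
      = (((vs.drop k).take t.length).zip t).foldl (fun d p => d.insert p.1 p.2) d := by
  intro t
  induction t with
  | nil => simp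
  | cons c rest ih =>
      intro k d hk
      have hkl : k < vs.length := by simp at hk; omega
      have e1 : ((k : Int) + 1) = ((k + 1 : Nat) : Int) := by push_cast; ring
      have e2 : PySem.List.pyGetD vs (k : Int) "" = vs[k] := by
        rw [PySem.List.pyGetD_natCast, List.getD_eq_getElem _ _ hkl]
      rw [List.foldl_cons, e1, e2, ih (k + 1) _ (by simp at hk ⊢; omega)]
      rw [List.drop_eq_getElem_cons hkl]
      simp only [List.length_cons, List.take_succ_cons, List.zip_cons_cons, List.foldl_cons]

theorem pv_dict_insert_append (l : List (String × Int)) (v : String) (c : Int)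
    (hv : v ∉ l.map Prod.fst) :
    (PySem.Dict.mk l).insert v c = PySem.Dict.mk (l ++ [(v, c)]) := by
  apply PySem.Dict.ext
  rw [PySem.Dict.items_insert_of_not_contains]
  simp only [PySem.Dict.contains_mk, List.any_eq_false]
  intro p hp hpv
  exact hv (List.mem_map.mpr ⟨p, hp, eq_of_beq hpv⟩)

theorem pv_Bfold : ∀ (suf pre : List String), (pre ++ suf).Nodup →
    suf.foldl (fun colorings v =>
        ([1, 2, 3] : List Int).flatMap (fun color => colorings.map (fun c => c.insert v color)))
      ((pvTuples pre.length).map (fun t => PySem.Dict.mk (pre.zip t)))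
    = (pvTuples (pre ++ suf).length).map (fun t => PySem.Dict.mk ((pre ++ suf).zip t)) := by
  intro suf
  induction suf with
  | nil => intro pre _; simp
  | cons v rest ih =>
      intro pre hnd
      have hv : v ∉ pre := fun hvp => List.disjoint_of_nodup_append hnd hvp (by simp)
      have hstep :
          ([1, 2, 3] : List Int).flatMap (fun color =>
            ((pvTuples pre.length).map (fun t => PySem.Dict.mk (pre.zip t))).map
              (fun c => c.insert v color))
          = (pvTuples (pre ++ [v]).length).map (fun t => PySem.Dict.mk ((pre ++ [v]).zip t)) := by
        rw [show (pre ++ [v]).length = pre.length + 1 by simp]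
        show _ = (pvTuples (pre.length + 1)).map _
        rw [show pvTuples (pre.length + 1)
            = ([1, 2, 3] : List Int).flatMap (fun c => (pvTuples pre.length).map (· ++ [c])) from rfl]
        rw [List.map_flatMap]
        apply List.flatMap_congr
        intro c _
        rw [List.map_map, List.map_map]
        apply List.map_congr_left
        intro t ht
        have hlt : t.length = pre.length := pvTuples_len _ t ht
        simp only [Function.comp_apply]
        rw [pv_dict_insert_append _ _ _
            (by rw [List.map_fst_zip (show pre.length ≤ t.length by omega)]; exact hv),
          List.zip_append (by omega)]
        simp
      rw [List.foldl_cons, hstep, ih (pre ++ [v]) (by simpa using hnd)]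
      simp

theorem pv_A_eq (graph : List (String × List String)) (hpre : graph ≠ []) :
    three_color graph
      = (pvTuples (PySem.List.dedup (graph.map Prod.fst)).length).map
          (fun t => (PySem.List.dedup (graph.map Prod.fst)).zip t) := by
  set vs := PySem.List.dedup (graph.map Prod.fst) with hvs
  have hnd : vs.Nodup := PySem.List.nodup_dedup _
  have hn : 0 < vs.length := by
    cases graph with
    | nil => exact absurd rfl hpre
    | cons p rest =>
        have : p.1 ∈ vs := by
          rw [hvs]; rw [PySem.List.mem_dedup]; simp
        exact List.length_pos_of_mem this
  show (((PySem.List.pyRange 0 (PySem.List.len (pvListPerms vs.length [])) (vs.length : Int)).map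
      (fun i => PySem.List.slice (pvListPerms vs.length []) (some i) (some (i + (vs.length : Int))))).foldl
      (fun coloring lst =>
        coloring ++ [(lst.foldl (fun (st : PySem.Dict String Int × Int) color =>
            (st.1.insert (PySem.List.pyGetD vs st.2 "") color, st.2 + 1))
          (PySem.Dict.empty, (0 : Int))).1.items]) []) = _
  have hflat : pvListPerms vs.length [] = (pvTuples vs.length).flatMap id := by
    rw [pvListPerms_eq]
    exact List.flatMap_congr (fun t _ => by simp)
  rw [hflat, pv_chunks vs.length hn _ (pvTuples_len _),
    PySem.List.foldl_append_singleton_eq_map]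
  apply List.map_congr_left
  intro t ht
  have hlt : t.length = vs.length := pvTuples_len _ t ht
  have hz := pv_zipfold vs t 0 PySem.Dict.empty (by omega)
  rw [Nat.cast_zero] at hz
  rw [hz, List.drop_zero, hlt, List.take_length]
  rw [PySem.Dict.items_foldl_insert_fresh (vs.zip t) Prod.fst Prod.snd PySem.Dict.empty
    (fun a _ => PySem.Dict.contains_empty _)
    (by rw [List.map_fst_zip (show vs.length ≤ t.length by omega)]; exact hnd)]
  show ([] : List (String × Int)) ++ _ = _
  simp

theorem pv_B_eq (graph : List (String × List String)) :
    three_color_alt graph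
      = (pvTuples (PySem.List.dedup (graph.map Prod.fst)).length).map
          (fun t => (PySem.List.dedup (graph.map Prod.fst)).zip t) := by
  set vs := PySem.List.dedup (graph.map Prod.fst) with hvs
  have hnd : vs.Nodup := PySem.List.nodup_dedup _
  show (vs.foldl (fun colorings v =>
      ([1, 2, 3] : List Int).flatMap (fun color =>
        colorings.map (fun c => c.insert v color)))
    [(PySem.Dict.empty : PySem.Dict String Int)]).map PySem.Dict.items = _
  have hstart : [(PySem.Dict.empty : PySem.Dict String Int)]
      = (pvTuples ([] : List String).length).map (fun t => PySem.Dict.mk (([] : List String).zip t)) := by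
    simp [pvTuples]
    rfl
  rw [hstart, pv_Bfold vs [] (by simpa using hnd)]
  simp only [List.nil_append, List.map_map]
  rfl

-- ===== VERDICT (by name: the statement is the Claim_ definition above) =====
theorem three_color_spec : Claim_equal_three_color := by
  intro graph _ hpre
  show three_color graph = three_color_alt graph
  rw [pv_A_eq graph hpre, pv_B_eq graph]

@[simp]
theorem three_color_raises : Claim_raises_three_color := by
  unfold Claim_raises_three_color
  exact ⟨fun g _ hr hp => hp hr, by decide⟩
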